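-- pv_equiv track=rewrite | github.com/victoriest/deep-learning-playgroud | chinese_recognize/ocr_split_text_line.py | get_white_steps_list
-- ===== SOURCE A (Python) =====
-- def get_white_steps_list(black_y, min_y, max_y):
--     lst = []
--     if len(black_y) == 0:
--         return lst
--     start = min_y
--     for i in range(len(black_y)):
--         if i % 2 == 0:
--             tmp = int((start + black_y[i]) / 2)
--             lst.append(tmp)
--         else:
--             start = black_y[i]
--     lst.append(int((start + max_y - 1) / 2))
--     return lst
-- ===== SOURCE B (Python) =====
-- def get_white_steps_list(black_y, min_y, max_y):
--     if len(black_y) == 0: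
--         return []
--     tops = list(black_y[0::2])
--     starts = [min_y] + list(black_y[1::2])
--     lst = [int((s + t) / 2) for s, t in zip(starts, tops)]
--     lst.append(int((starts[-1] + max_y - 1) / 2))
--     return lst
-- ===== Notes on version B (the rewrite author's own statement) =====
-- stated objective: alternative
-- what changed: Replaces A's indexed loop with a mutable 'start' variable and parity branching by slicing the even-indexed and odd-indexed values into two lists and zipping each even-index boundary with its preceding start; no per-iteration mutation or parity test remains.
import Mathlib
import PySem

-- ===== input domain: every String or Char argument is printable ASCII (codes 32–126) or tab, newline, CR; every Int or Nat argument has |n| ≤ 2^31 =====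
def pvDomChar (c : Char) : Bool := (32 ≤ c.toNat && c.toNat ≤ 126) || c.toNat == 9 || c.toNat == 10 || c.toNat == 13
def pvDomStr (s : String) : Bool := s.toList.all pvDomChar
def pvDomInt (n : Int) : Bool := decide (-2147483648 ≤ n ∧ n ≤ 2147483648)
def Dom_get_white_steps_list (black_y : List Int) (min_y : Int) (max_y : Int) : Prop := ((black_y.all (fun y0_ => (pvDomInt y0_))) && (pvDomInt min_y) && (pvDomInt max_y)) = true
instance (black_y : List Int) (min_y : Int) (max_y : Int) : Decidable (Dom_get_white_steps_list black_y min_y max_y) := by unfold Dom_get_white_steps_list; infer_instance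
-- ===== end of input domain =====

-- B replaces A's indexed loop with mutable start/parity branching by slicing even- and
-- odd-indexed values and zipping each even-index boundary with its preceding start (alternative decomposition).


-- int((a+b)/2) in Python: float division then truncation toward zero; exact as Int.tdiv on
-- the stated domain (|a+b| ≤ 2^33 < 2^53, so the float result is exact).
def pyHalf (x : Int) : Int := Int.tdiv x 2

-- ===== PORT A =====
-- A's loop 'for i in range(len(black_y)): … black_y[i] …' ported as a foldl over
-- PySem.List.enumerate (same indices, same elements, same order), state = (start, lst).
def get_white_steps_list (black_y : List Int) (min_y : Int) (max_y : Int) : List Int :=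
  if black_y.length == 0 then []
  else
    let st := (PySem.List.enumerate black_y 0).foldl
      (fun (st : Int × List Int) p =>
        if PySem.Int.mod p.1 2 == 0 then (st.1, st.2 ++ [pyHalf (st.1 + p.2)])
        else (p.2, st.2)) (min_y, [])
    st.2 ++ [pyHalf (st.1 + max_y - 1)]

-- ===== PORT B =====
-- xs[0::2] (elements at even indices)
def pvEvens : List Int → List Int
  | [] => []
  | [x] => [x]
  | x :: _ :: xs => x :: pvEvens xs

-- xs[1::2] (elements at odd indices)
def pvOdds : List Int → List Int
  | [] => []
  | _ :: xs => pvEvens xs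

def get_white_steps_list_alt (black_y : List Int) (min_y : Int) (max_y : Int) : List Int :=
  match black_y with
  | [] => []
  | _ =>
    let tops := pvEvens black_y
    let starts := min_y :: pvOdds black_y
    let lst := List.zipWith (fun s t => pyHalf (s + t)) starts tops
    lst ++ [pyHalf (starts.getLast (by simp [starts]) + max_y - 1)]

-- ===== PRECONDITION & SPEC =====
def Spec_get_white_steps_list (black_y : List Int) (min_y : Int) (max_y : Int) (out : List Int) : Prop := out = get_white_steps_list_alt black_y min_y max_y
instance (black_y : List Int) (min_y : Int) (max_y : Int) (out : List Int) : Decidable (Spec_get_white_steps_list black_y min_y max_y out) := by unfold Spec_get_white_steps_list; infer_instance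

-- ===== CLAIM (what is proved, stated in full; the proofs are below) =====
def Claim_equal_get_white_steps_list : Prop := ∀ (black_y : List Int) (min_y : Int) (max_y : Int), Dom_get_white_steps_list black_y min_y max_y → Spec_get_white_steps_list black_y min_y max_y (get_white_steps_list black_y min_y max_y)

-- ===== LEMMAS AND PROOFS =====

def pvStep : Int × List Int → Int × Int → Int × List Int :=
  fun st p =>
    if PySem.Int.mod p.1 2 == 0 then (st.1, st.2 ++ [pyHalf (st.1 + p.2)])
    else (p.2, st.2)

-- the fold over an enumeration starting at an even index k computes
-- (last start, acc ++ zipped mids), by two-step induction on the list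
theorem pvEvens_cons (y : Int) (xs : List Int) : pvEvens (y :: xs) = y :: pvOdds xs := by
  cases xs <;> simp [pvEvens, pvOdds]

theorem pvFold_eq (l : List Int) : ∀ (k : Nat) (start : Int) (acc : List Int),
    (PySem.List.enumerate l (2 * (k : Int))).foldl pvStep (start, acc)
      = (((start :: pvOdds l).getLast (by simp)),
         acc ++ List.zipWith (fun s t => pyHalf (s + t)) (start :: pvOdds l) (pvEvens l)) := by
  induction l using pvEvens.induct with
  | case1 =>
      intro k start acc
      simp [PySem.List.enumerate, pvEvens, pvOdds]
  | case2 x =>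
      intro k start acc
      simp [PySem.List.enumerate_cons, PySem.List.enumerate_nil, pvStep, pvEvens, pvOdds]
  | case3 x y xs ih =>
      intro k start acc
      have h2 : PySem.Int.mod (2 * (k : Int)) 2 = 0 := by
        simp [PySem.Int.mod]
      have h3 : ¬ PySem.Int.mod (2 * (k : Int) + 1) 2 = 0 := by
        simp [PySem.Int.mod]
      have hnext : (2 : Int) * (k : Int) + 1 + 1 = 2 * ((k + 1 : Nat) : Int) := by
        push_cast; ring
      simp only [PySem.List.enumerate_cons, List.foldl_cons]
      simp only [pvStep, h2, h3, beq_iff_eq, hnext]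
      simp only [ite_true, ite_false]
      rw [ih (k + 1) y (acc ++ [pyHalf (start + x)])]
      simp [pvEvens_cons, pvOdds, List.getLast_cons]

-- ===== VERDICT (by name: the statement is the Claim_ definition above) =====
theorem get_white_steps_list_spec : Claim_equal_get_white_steps_list := by
  intro black_y min_y max_y _
  unfold Spec_get_white_steps_list
  cases black_y with
  | nil => rfl
  | cons x xs =>
      show get_white_steps_list (x :: xs) min_y max_y = _
      unfold get_white_steps_list get_white_steps_list_alt
      have h := pvFold_eq (x :: xs) 0 min_y []
      simp only [Nat.cast_zero, mul_zero] at h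
      simp only [List.length_cons] at *
      simp only [show (PySem.List.enumerate (x :: xs) 0).foldl
          (fun (st : Int × List Int) p =>
            if PySem.Int.mod p.1 2 == 0 then (st.1, st.2 ++ [pyHalf (st.1 + p.2)])
            else (p.2, st.2)) (min_y, []) = _ from h]
      simp
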